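-- pv_equiv track=rewrite | github.com/Barbariansyah/pyjudge | test/max_3/max_3_v5.py | max_3_v5
-- ===== SOURCE A (Python) =====
-- def max_3_v5(a,b,c):
--   arr = []
--   arr.append(a)
--   arr.append(b)
--   arr.append(c)
--   max = arr[0]
--   for i in arr:
--     if (i>max):
--       max=i
--   return max
-- ===== SOURCE B (Python) =====
-- def max_3_v5(a, b, c):
--     m = b if b > a else a
--     return c if c > m else m
-- ===== Notes on version B (the rewrite author's own statement) =====
-- stated objective: simpler
-- what changed: Replaces the list construction and scanning loop with two nested conditional expressions (a closed-form pairwise max), keeping strict > so ties keep the earlier operand.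
import Mathlib
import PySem

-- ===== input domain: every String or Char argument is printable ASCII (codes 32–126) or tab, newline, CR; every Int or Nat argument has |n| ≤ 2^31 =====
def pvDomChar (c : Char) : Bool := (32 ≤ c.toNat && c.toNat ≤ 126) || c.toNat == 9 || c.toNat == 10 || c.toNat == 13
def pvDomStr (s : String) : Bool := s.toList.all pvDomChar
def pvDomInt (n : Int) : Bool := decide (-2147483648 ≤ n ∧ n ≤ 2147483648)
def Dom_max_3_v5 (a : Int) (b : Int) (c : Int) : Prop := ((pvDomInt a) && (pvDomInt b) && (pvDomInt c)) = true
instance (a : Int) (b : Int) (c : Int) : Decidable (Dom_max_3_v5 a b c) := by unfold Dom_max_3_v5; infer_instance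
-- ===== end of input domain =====

-- B replaces A's list+loop max with two nested conditional expressions (simpler, closed form).


-- ===== PORT A =====
-- literal port of A: build the list, take arr[0], fold the loop 'if i > max then i else max'
def max_3_v5 (a : Int) (b : Int) (c : Int) : Int :=
  let arr : List Int := [] ++ [a] ++ [b] ++ [c]
  let max0 := arr.headI
  arr.foldl (fun max i => if i > max then i else max) max0

-- ===== PORT B =====
-- port of B: two nested conditionals, no container
def max_3_v5_alt (a : Int) (b : Int) (c : Int) : Int :=
  let m := if b > a then b else a
  if c > m then c else m

-- ===== PRECONDITION & SPEC =====
def Spec_max_3_v5 (a : Int) (b : Int) (c : Int) (out : Int) : Prop := out = max_3_v5_alt a b c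
instance (a : Int) (b : Int) (c : Int) (out : Int) : Decidable (Spec_max_3_v5 a b c out) := by unfold Spec_max_3_v5; infer_instance

-- ===== CLAIM (what is proved, stated in full; the proofs are below) =====
def Claim_equal_max_3_v5 : Prop := ∀ (a : Int) (b : Int) (c : Int), Dom_max_3_v5 a b c → Spec_max_3_v5 a b c (max_3_v5 a b c)

-- ===== LEMMAS AND PROOFS =====

-- ===== VERDICT (by name: the statement is the Claim_ definition above) =====
theorem max_3_v5_spec : Claim_equal_max_3_v5 := by
  intro a b c _
  unfold Spec_max_3_v5 max_3_v5 max_3_v5_alt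
  simp only [List.foldl, List.headI, List.nil_append, List.cons_append]
  split_ifs <;> omega
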